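-- pv_equiv track=rewrite | github.com/NemanjaZivanovic/master-rad | BruteForceAlgorithm.py | enhanced_brute_force_algorithm_itertools
-- ===== SOURCE A (Python) =====
-- import itertools
--
-- def check_solution(number, graph):
--   for node in graph:
--     if number & node == 0:
--       return False
--   return True
--
-- def get_transpose_graph(graph):
--     transpose_graph = []
--     n = len(graph)
--
--     for i in range(n):
--         set = 0
--         for j in range(n):
--             if graph[j] & (1 << n - i - 1):
--                 set |= (1 << n - j - 1)
--         transpose_graph.append(set)
--
--     return transpose_graph
--
-- def enhanced_brute_force_algorithm_itertools(graph):
--   n = len(graph)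
--   graph = get_transpose_graph(graph)
--   for length in range(1, n + 1):
--     for subset in itertools.combinations(range(1, n + 1), length):
--       current_value = 0
--       for el in subset:
--         current_value |= (1 << (n - el))
--       if check_solution(current_value, graph):
--         return current_value
-- ===== SOURCE B (Python) =====
-- def get_transpose_graph(graph):
--     transpose_graph = []
--     n = len(graph)
--
--     for i in range(n):
--         set = 0
--         for j in range(n):
--             if graph[j] & (1 << n - i - 1):
--                 set |= (1 << n - j - 1)
--         transpose_graph.append(set)
--
--     return transpose_graph
--
--
-- def enhanced_brute_force_algorithm_itertools(graph):
--     # Iterative-deepening backtracking: try subset sizes 1..n; for each size,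
--     # a depth-first search picks vertices in increasing order, building the
--     # bitmask incrementally (vertex v occupies bit n - v), and returns the
--     # first mask that intersects every node of the transpose graph.
--     n = len(graph)
--     transpose = get_transpose_graph(graph)
--
--     def search(vertex, remaining, mask):
--         if remaining == 0:
--             return mask if all(mask & node for node in transpose) else None
--         for v in range(vertex, n + 1):
--             found = search(v + 1, remaining - 1, mask | (1 << (n - v)))
--             if found is not None:
--                 return found
--         return None
--
--     for size in range(1, n + 1):
--         found = search(1, size, 0)
--         if found is not None:
--             return found
--     return None
-- ===== Notes on version B (the rewrite author's own statement) =====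
-- stated objective: alternative
-- what changed: Replaces the itertools.combinations enumeration with its per-subset element-to-bit fold by a recursive iterative-deepening depth-first search that picks vertices in increasing order and builds the candidate bitmask incrementally.
import Mathlib
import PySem

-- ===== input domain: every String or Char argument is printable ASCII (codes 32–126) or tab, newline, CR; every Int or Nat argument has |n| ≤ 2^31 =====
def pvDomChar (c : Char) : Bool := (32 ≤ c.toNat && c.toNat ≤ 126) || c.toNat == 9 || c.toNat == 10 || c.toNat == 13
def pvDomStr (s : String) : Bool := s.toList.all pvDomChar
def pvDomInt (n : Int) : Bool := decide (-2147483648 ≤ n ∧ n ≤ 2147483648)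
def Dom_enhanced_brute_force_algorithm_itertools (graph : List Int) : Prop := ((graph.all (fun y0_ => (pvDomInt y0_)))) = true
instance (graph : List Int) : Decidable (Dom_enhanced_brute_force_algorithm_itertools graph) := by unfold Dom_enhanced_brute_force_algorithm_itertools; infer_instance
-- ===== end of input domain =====

-- B replaces A's itertools.combinations enumeration (with a per-subset element-to-bit fold)
-- by a recursive iterative-deepening depth-first search that picks vertices in increasing
-- order and builds the candidate bitmask incrementally; objective: alternative (same cost).

-- ===== PORT A =====
-- for node in graph: if number & node == 0: return False / return True
def pv_check_solution (number : Int) (graph : List Int) : Bool :=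
  graph.all (fun node => !(PySem.Int.band number node == 0))

-- get_transpose_graph, shared verbatim by A and B (Source B contains the identical helper)
def pv_get_transpose_graph (graph : List Int) : List Int :=
  let n := graph.length
  (PySem.List.pyRange 0 (n : Int) 1).foldl (fun transpose_graph i =>
    let s := (PySem.List.pyRange 0 (n : Int) 1).foldl (fun s j =>
      -- 1 << (n - i - 1): the shift amount is always ≥ 0 here (0 ≤ i,j < n), so .toNat is exact
      if !(PySem.Int.band (PySem.List.pyGetD graph j 0) ((1 : Int) <<< ((n : Int) - i - 1).toNat) == 0)
      then PySem.Int.bor s ((1 : Int) <<< ((n : Int) - j - 1).toNat) else s) 0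
    transpose_graph ++ [s]) []

-- itertools.combinations(xs, k) in its exact (lexicographic) emission order
def pvCombos {α : Type} : List α → Nat → List (List α)
  | _, 0 => [[]]
  | [], _ + 1 => []
  | x :: xs, k + 1 => ((pvCombos xs k).map (fun c => x :: c)) ++ pvCombos xs (k + 1)

def enhanced_brute_force_algorithm_itertools (graph : List Int) : Option Int :=
  let n := graph.length
  let g := pv_get_transpose_graph graph
  (PySem.List.pyRange 1 ((n : Int) + 1) 1).findSome? (fun length =>
    -- length ranges over 1..n, so .toNat is exact
    (pvCombos (PySem.List.pyRange 1 ((n : Int) + 1) 1) length.toNat).findSome? (fun subset =>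
      -- current_value |= 1 << (n - el); el ∈ 1..n so the shift amount is ≥ 0 and .toNat is exact
      let current_value := subset.foldl
        (fun cv el => PySem.Int.bor cv ((1 : Int) <<< ((n : Int) - el).toNat)) 0
      if pv_check_solution current_value g then some current_value else none))

-- ===== PORT B =====
-- def search(vertex, remaining, mask): the recursive backtracking helper of Source B.
-- `remaining` is a count decremented to 0, so it is carried as a Nat (exact here);
-- it is matched first so the recursion is structural.
def pvSearch (g : List Int) (n : Nat) : Nat → Int → Int → Option Int
  | 0, _vertex, mask =>
      if g.all (fun node => !(PySem.Int.band mask node == 0)) then some mask else none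
  | r + 1, vertex, mask =>
      (PySem.List.pyRange vertex ((n : Int) + 1) 1).findSome? (fun v =>
        -- mask | (1 << (n - v)); v ∈ 1..n so the shift amount is ≥ 0 and .toNat is exact
        pvSearch g n r (v + 1) (PySem.Int.bor mask ((1 : Int) <<< ((n : Int) - v).toNat)))

def enhanced_brute_force_algorithm_itertools_alt (graph : List Int) : Option Int :=
  let n := graph.length
  let transpose := pv_get_transpose_graph graph
  (PySem.List.pyRange 1 ((n : Int) + 1) 1).findSome? (fun size =>
    -- size ranges over 1..n, so .toNat is exact
    pvSearch transpose n size.toNat 1 0)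

-- ===== PRECONDITION & SPEC =====
def Spec_enhanced_brute_force_algorithm_itertools (graph : List Int) (out : Option Int) : Prop := out = enhanced_brute_force_algorithm_itertools_alt graph
instance (graph : List Int) (out : Option Int) : Decidable (Spec_enhanced_brute_force_algorithm_itertools graph out) := by unfold Spec_enhanced_brute_force_algorithm_itertools; infer_instance

-- ===== CLAIM (what is proved, stated in full; the proofs are below) =====
def Claim_equal_enhanced_brute_force_algorithm_itertools : Prop := ∀ (graph : List Int), Dom_enhanced_brute_force_algorithm_itertools graph → Spec_enhanced_brute_force_algorithm_itertools graph (enhanced_brute_force_algorithm_itertools graph)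

-- ===== LEMMAS AND PROOFS =====

-- B's DFS over sizes r, started at vertex v with accumulator mask, visits exactly the
-- combinations of the remaining vertex range in itertools' lexicographic order.
theorem pvSearch_eq (g : List Int) (n : Nat) :
    ∀ (r : Nat) (v mask : Int),
      pvSearch g n r v mask
        = (pvCombos (PySem.List.pyRange v ((n : Int) + 1) 1) r).findSome? (fun c =>
            let m := c.foldl (fun cv el => PySem.Int.bor cv ((1 : Int) <<< ((n : Int) - el).toNat)) mask
            if g.all (fun node => !(PySem.Int.band m node == 0)) then some m else none) := by
  intro r
  induction r with
  | zero =>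
    intro v mask
    simp [pvSearch, pvCombos]
  | succ r ih =>
    intro v mask
    -- inner induction on the length of the remaining vertex range
    have key : ∀ (fuel : Nat) (v mask : Int), (((n : Int) + 1) - v).toNat ≤ fuel →
        pvSearch g n (r + 1) v mask
          = (pvCombos (PySem.List.pyRange v ((n : Int) + 1) 1) (r + 1)).findSome? (fun c =>
              let m := c.foldl (fun cv el => PySem.Int.bor cv ((1 : Int) <<< ((n : Int) - el).toNat)) mask
              if g.all (fun node => !(PySem.Int.band m node == 0)) then some m else none) := by
      intro fuel
      induction fuel with
      | zero =>
        intro v mask h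
        have hnil : PySem.List.pyRange v ((n : Int) + 1) 1 = [] :=
          PySem.List.pyRange_one_eq_nil (by omega)
        simp only [pvSearch, hnil, pvCombos]
        rfl
      | succ fuel ihf =>
        intro v mask h
        by_cases hv : v < (n : Int) + 1
        · have hcons := PySem.List.pyRange_one_cons hv
          simp only [pvSearch, hcons, List.findSome?_cons, pvCombos, List.findSome?_append,
            List.findSome?_map]
          have hhead := ih (v + 1) (PySem.Int.bor mask ((1 : Int) <<< ((n : Int) - v).toNat))
          have htail : (PySem.List.pyRange (v + 1) ((n : Int) + 1) 1).findSome? (fun u =>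
              pvSearch g n r (u + 1) (PySem.Int.bor mask ((1 : Int) <<< ((n : Int) - u).toNat)))
              = (pvCombos (PySem.List.pyRange (v + 1) ((n : Int) + 1) 1) (r + 1)).findSome? (fun c =>
                  let m := c.foldl (fun cv el => PySem.Int.bor cv ((1 : Int) <<< ((n : Int) - el).toNat)) mask
                  if g.all (fun node => !(PySem.Int.band m node == 0)) then some m else none) := by
            have := ihf (v + 1) mask (by omega)
            simpa only [pvSearch] using this
          rw [htail, hhead]
          simp only [Function.comp_def, List.foldl_cons]
          cases (pvCombos (PySem.List.pyRange (v + 1) ((n : Int) + 1) 1) r).findSome? (fun c =>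
              let m := c.foldl (fun cv el => PySem.Int.bor cv ((1 : Int) <<< ((n : Int) - el).toNat))
                (PySem.Int.bor mask ((1 : Int) <<< ((n : Int) - v).toNat))
              if g.all (fun node => !(PySem.Int.band m node == 0)) then some m else none) <;> rfl
        · have hnil : PySem.List.pyRange v ((n : Int) + 1) 1 = [] :=
            PySem.List.pyRange_one_eq_nil (by omega)
          simp only [pvSearch, hnil, pvCombos]
          rfl
    exact key ((((n : Int) + 1) - v).toNat) v mask le_rfl

theorem pvFindSome?_congr {α β : Type} (l : List α) (f g : α → Option β)
    (h : ∀ x ∈ l, f x = g x) : l.findSome? f = l.findSome? g := by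
  induction l with
  | nil => rfl
  | cons x xs ih =>
    rw [List.findSome?_cons, List.findSome?_cons, h x (by simp),
      ih (fun y hy => h y (by simp [hy]))]

-- ===== VERDICT (by name: the statement is the Claim_ definition above) =====
theorem enhanced_brute_force_algorithm_itertools_spec : Claim_equal_enhanced_brute_force_algorithm_itertools := by
  intro graph _
  unfold Spec_enhanced_brute_force_algorithm_itertools
  unfold enhanced_brute_force_algorithm_itertools enhanced_brute_force_algorithm_itertools_alt
  apply pvFindSome?_congr
  intro length _
  rw [pvSearch_eq]
  apply pvFindSome?_congr
  intro subset _
  rfl
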